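-- pv_equiv track=rewrite | github.com/levgou/pqtrees | pqtrees/utilities/perm_helpers.py | neighbour_set
-- ===== SOURCE A (Python) =====
-- def neighbour_set(perm, char):
--     indices = [i for i, x in enumerate(perm) if x == char]
--     neighbour_indices = {
--         x - 1 for x in indices if x > 0
--     }.union({
--         x + 1 for x in indices if x < len(perm) - 1
--     })
--
--     neighbours = frozenset(perm[idx] for idx in neighbour_indices)
--     return neighbours
-- ===== SOURCE B (Python) =====
-- def neighbour_set(perm, char):
--     found = set()
--     n = len(perm)
--     for i in range(1, n):
--         if perm[i] == char:
--             found.add(perm[i - 1])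
--     for i in range(n - 1):
--         if perm[i] == char:
--             found.add(perm[i + 1])
--     return frozenset(found)
-- ===== Notes on version B (the rewrite author's own statement) =====
-- stated objective: alternative
-- what changed: Replaces A's pipeline (enumerate to an index list, two index-set comprehensions unioned, then mapping neighbour indices back to values) with two direct sliding scans over the values that add perm[i-1]/perm[i+1] to one value set whenever perm[i] == char.
import Mathlib
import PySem

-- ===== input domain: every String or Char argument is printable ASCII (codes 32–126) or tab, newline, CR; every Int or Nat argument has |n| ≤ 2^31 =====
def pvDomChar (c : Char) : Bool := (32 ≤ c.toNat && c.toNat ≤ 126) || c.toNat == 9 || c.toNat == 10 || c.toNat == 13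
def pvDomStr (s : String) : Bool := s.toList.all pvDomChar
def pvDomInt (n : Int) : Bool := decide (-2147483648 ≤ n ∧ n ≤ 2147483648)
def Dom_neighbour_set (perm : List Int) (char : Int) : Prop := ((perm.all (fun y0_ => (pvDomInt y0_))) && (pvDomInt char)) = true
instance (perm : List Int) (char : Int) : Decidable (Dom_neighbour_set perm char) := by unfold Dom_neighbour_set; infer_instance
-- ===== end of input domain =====

-- B replaces A's index-list / index-set / map-back pipeline by two direct sliding scans over
-- the values (objective: alternative decomposition; not measurably faster).

-- ===== PORT A =====
-- perm[idx] is ported as pyGetD (idx is always a valid index: it is a neighbour index of an occurrence)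
def neighbour_set (perm : List Int) (char : Int) : List Int :=
  let indices : List Int :=
    ((PySem.List.enumerate perm).filter (fun p => p.2 == char)).map (fun p => p.1)
  let neighbour_indices : PySem.Set Int :=
    PySem.Set.union
      (PySem.Set.ofList ((indices.filter (fun x => decide (x > 0))).map (fun x => x - 1)))
      ((indices.filter (fun x => decide (x < (perm.length : Int) - 1))).map (fun x => x + 1))
  PySem.Set.ofList (neighbour_indices.map (fun idx => PySem.List.pyGetD perm idx 0))

-- ===== PORT B =====
def neighbour_set_alt (perm : List Int) (char : Int) : List Int :=
  let n : Int := (perm.length : Int)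
  let found : PySem.Set Int :=
    (PySem.List.pyRange 1 n 1).foldl
      (fun s i => if PySem.List.pyGetD perm i 0 == char
                  then PySem.Set.add s (PySem.List.pyGetD perm (i - 1) 0) else s)
      PySem.Set.empty
  (PySem.List.pyRange 0 (n - 1) 1).foldl
    (fun s i => if PySem.List.pyGetD perm i 0 == char
                then PySem.Set.add s (PySem.List.pyGetD perm (i + 1) 0) else s)
    found

-- ===== PRECONDITION & SPEC =====
def Spec_neighbour_set (perm : List Int) (char : Int) (out : List Int) : Prop := out = neighbour_set_alt perm char
instance (perm : List Int) (char : Int) (out : List Int) : Decidable (Spec_neighbour_set perm char out) := by unfold Spec_neighbour_set; infer_instance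

-- ===== CLAIM (what is proved, stated in full; the proofs are below) =====
def Claim_equal_neighbour_set : Prop := ∀ (perm : List Int) (char : Int), Dom_neighbour_set perm char → Spec_neighbour_set perm char (neighbour_set perm char)

-- ===== LEMMAS AND PROOFS =====

-- deduplicating a list, mapping, then deduplicating again = deduplicating the mapped list
theorem ofList_map_ofList {α β : Type} [DecidableEq α] [DecidableEq β]
    (f : α → β) (xs : List α) :
    PySem.Set.ofList ((PySem.Set.ofList xs).map f) = PySem.Set.ofList (xs.map f) := by
  induction xs using List.reverseRecOn with
  | nil => rfl
  | append_singleton ys x ih =>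
    rw [PySem.Set.ofList_append_singleton, List.map_append, List.map_singleton,
        PySem.Set.ofList_append_singleton]
    by_cases hx : x ∈ PySem.Set.ofList ys
    · rw [PySem.Set.add_of_mem hx, ih, PySem.Set.add_of_mem]
      rw [PySem.Set.mem_ofList] at hx ⊢
      exact List.mem_map_of_mem hx
    · rw [PySem.Set.add_of_not_mem hx, List.map_append, List.map_singleton,
          PySem.Set.ofList_append_singleton, ih]

-- a conditional-add fold is Set.ofList-building over the filtered, mapped list
theorem foldl_add_ite {α β : Type} [DecidableEq β]
    (P : α → Bool) (f : α → β) (l : List α) (s : PySem.Set β) :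
    l.foldl (fun s i => if P i then PySem.Set.add s (f i) else s) s
      = ((l.filter P).map f).foldl PySem.Set.add s := by
  induction l generalizing s with
  | nil => rfl
  | cons a l ih =>
    by_cases h : P a <;> simp [h, ih]

-- filtering the positive elements out of range(0,n) = range(1,n)
theorem filter_pos_pyRange (n : Int) :
    (PySem.List.pyRange 0 n 1).filter (fun x => decide (x > 0)) = PySem.List.pyRange 1 n 1 := by
  by_cases h : 0 < n
  · rw [PySem.List.pyRange_one_cons h, List.filter_cons]
    have h0 : (decide ((0:Int) > 0)) = false := by decide
    rw [h0]
    simp only [Bool.false_eq_true, if_false]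
    exact List.filter_eq_self.mpr (fun x hx => by
      have := (PySem.List.mem_pyRange_one.mp hx).1; simp; omega)
  · rw [PySem.List.pyRange_one_eq_nil (by omega), PySem.List.pyRange_one_eq_nil (by omega)]
    rfl

-- filtering the elements below n-1 out of range(0,n) = range(0,n-1)
theorem filter_lt_pyRange (n : Int) :
    (PySem.List.pyRange 0 n 1).filter (fun x => decide (x < n - 1)) = PySem.List.pyRange 0 (n - 1) 1 := by
  by_cases h : 0 < n
  · rw [PySem.List.pyRange_one_append 0 (n-1) n (by omega) (by omega), List.filter_append]
    have h1 : (PySem.List.pyRange 0 (n-1) 1).filter (fun x => decide (x < n - 1))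
        = PySem.List.pyRange 0 (n-1) 1 :=
      List.filter_eq_self.mpr (fun x hx => by
        have := (PySem.List.mem_pyRange_one.mp hx).2; simp; omega)
    have h2 : (PySem.List.pyRange (n-1) n 1).filter (fun x => decide (x < n - 1)) = [] :=
      List.filter_eq_nil_iff.mpr (fun x hx => by
        have := (PySem.List.mem_pyRange_one.mp hx).1; simp; omega)
    rw [h1, h2, List.append_nil]
  · rw [PySem.List.pyRange_one_eq_nil (by omega), PySem.List.pyRange_one_eq_nil (by omega)]
    rfl

-- filters commute
theorem filter_filter_comm {α : Type} (p q : α → Bool) (l : List α) :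
    (l.filter p).filter q = (l.filter q).filter p := by
  simp [List.filter_filter, Bool.and_comm]

theorem neighbour_set_eq_alt (perm : List Int) (char : Int) :
    neighbour_set perm char = neighbour_set_alt perm char := by
  unfold neighbour_set neighbour_set_alt
  simp only []
  set n : Int := (perm.length : Int) with hn
  set g : Int → Int := fun idx => PySem.List.pyGetD perm idx 0 with hg
  set P : Int → Bool := fun j => PySem.List.pyGetD perm j 0 == char with hP
  -- A's indices list = range(0,n) filtered by P
  have hidx : ((PySem.List.enumerate perm).filter (fun p => p.2 == char)).map (fun p => p.1)
      = (PySem.List.pyRange 0 n 1).filter P := by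
    rw [PySem.List.enumerate_eq_map_pyRange (d := 0), List.filter_map, List.map_map]
    simp [Function.comp_def, hP]
    rfl
  rw [hidx]
  -- the two index lists, pushed to value lists
  have hL : ((((PySem.List.pyRange 0 n 1).filter P).filter (fun x => decide (x > 0))).map
        (fun x => x - 1)).map g
      = ((PySem.List.pyRange 1 n 1).filter P).map (fun i => PySem.List.pyGetD perm (i - 1) 0) := by
    rw [filter_filter_comm, filter_pos_pyRange, List.map_map]
    rfl
  have hR : ((((PySem.List.pyRange 0 n 1).filter P).filter (fun x => decide (x < n - 1))).map
        (fun x => x + 1)).map g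
      = ((PySem.List.pyRange 0 (n - 1) 1).filter P).map (fun i => PySem.List.pyGetD perm (i + 1) 0) := by
    rw [filter_filter_comm, filter_lt_pyRange, List.map_map]
    rfl
  -- A's side: union = ofList of the concatenation; dedup-then-map-then-dedup collapses
  have hunion : ∀ (xs ys : List Int),
      PySem.Set.union (PySem.Set.ofList xs) ys = PySem.Set.ofList (xs ++ ys) := by
    intro xs ys; rw [PySem.Set.ofList_append]; rfl
  rw [hunion, ofList_map_ofList, List.map_append, hL, hR]
  -- B's side: the two folds build ofList of the same concatenation
  rw [foldl_add_ite, foldl_add_ite, ← List.foldl_append]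
  rw [PySem.Set.ofList_eq_foldl]
  rfl

-- ===== VERDICT (by name: the statement is the Claim_ definition above) =====
theorem neighbour_set_spec : Claim_equal_neighbour_set := by
  intro perm char _
  unfold Spec_neighbour_set
  exact neighbour_set_eq_alt perm char
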